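-- pv_equiv track=rewrite | github.com/kypello/Scummpiler | costume_decoder.py | get_limb_data
-- ===== SOURCE A (Python) =====
-- def get_limb_data(pict_datas, pict_data_start):
--     limb_data = []
--     offset = pict_data_start
--
--     for pict_data in pict_datas:
--         if len(pict_data) == 1:
--             limb_data.append(0)
--             limb_data.append(0)
--             continue
--
--         limb_data.append(offset & 0xFF)
--         limb_data.append((offset & 0xFF00) >> 8)
--
--         offset += len(pict_data)
--
--     return limb_data
-- ===== SOURCE B (Python) =====
-- from itertools import accumulate
--
-- def get_limb_data(pict_datas, pict_data_start):
--     contributions = [0 if len(p) == 1 else len(p) for p in pict_datas]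
--     offsets = accumulate(contributions, initial=pict_data_start)
--     limb_data = []
--     for pict_data, offset in zip(pict_datas, offsets):
--         if len(pict_data) == 1:
--             limb_data += [0, 0]
--         else:
--             limb_data += [offset & 0xFF, (offset & 0xFF00) >> 8]
--     return limb_data
-- ===== Notes on version B (the rewrite author's own statement) =====
-- stated objective: alternative
-- what changed: Replaces A's single interleaved accumulate-and-emit loop with a two-pass decomposition: first an itertools.accumulate prefix-offset table over per-element contributions, then a zip pass that emits the two bytes per element from the table.
import Mathlib
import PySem

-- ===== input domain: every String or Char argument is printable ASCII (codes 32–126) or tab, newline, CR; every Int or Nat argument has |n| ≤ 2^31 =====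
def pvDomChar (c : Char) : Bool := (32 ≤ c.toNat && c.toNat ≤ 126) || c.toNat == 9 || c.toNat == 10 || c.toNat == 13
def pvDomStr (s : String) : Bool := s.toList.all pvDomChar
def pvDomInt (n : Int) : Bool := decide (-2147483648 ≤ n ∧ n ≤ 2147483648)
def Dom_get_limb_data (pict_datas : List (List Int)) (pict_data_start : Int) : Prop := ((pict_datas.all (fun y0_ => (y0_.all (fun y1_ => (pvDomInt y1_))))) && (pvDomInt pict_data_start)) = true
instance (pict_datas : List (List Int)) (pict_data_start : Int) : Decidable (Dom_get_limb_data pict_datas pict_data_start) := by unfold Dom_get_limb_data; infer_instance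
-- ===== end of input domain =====

-- ===== PORT A =====
-- B precomputes a prefix-offset table then emits bytes in a second pass, replacing A's
-- interleaved accumulate-and-emit loop (objective: alternative decomposition, same cost).
-- A's loop, carrying the running offset; emits two bytes per element.
def pvLoopA (pict_datas : List (List Int)) (offset : Int) : List Int :=
  match pict_datas with
  | [] => []
  | pict_data :: rest =>
    if pict_data.length = 1 then
      0 :: 0 :: pvLoopA rest offset
    else
      PySem.Int.band offset 0xFF :: (PySem.Int.band offset 0xFF00) >>> 8 ::
        pvLoopA rest (offset + (pict_data.length : Int))

def get_limb_data (pict_datas : List (List Int)) (pict_data_start : Int) : List Int :=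
  pvLoopA pict_datas pict_data_start

-- ===== PORT B =====
-- itertools.accumulate(contribs, initial=start): start and all running sums.
def pvAccum (contribs : List Int) (start : Int) : List Int :=
  match contribs with
  | [] => [start]
  | c :: cs => start :: pvAccum cs (start + c)

def get_limb_data_alt (pict_datas : List (List Int)) (pict_data_start : Int) : List Int :=
  let contributions := pict_datas.map (fun p => if p.length = 1 then (0 : Int) else (p.length : Int))
  let offsets := pvAccum contributions pict_data_start
  (pict_datas.zip offsets).flatMap (fun po =>
    if po.1.length = 1 then [0, 0]
    else [PySem.Int.band po.2 0xFF, (PySem.Int.band po.2 0xFF00) >>> 8])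

-- ===== PRECONDITION & SPEC =====
def Spec_get_limb_data (pict_datas : List (List Int)) (pict_data_start : Int) (out : List Int) : Prop := out = get_limb_data_alt pict_datas pict_data_start
instance (pict_datas : List (List Int)) (pict_data_start : Int) (out : List Int) : Decidable (Spec_get_limb_data pict_datas pict_data_start out) := by unfold Spec_get_limb_data; infer_instance

-- ===== CLAIM =====
def Claim_equal_get_limb_data : Prop := ∀ (pict_datas : List (List Int)) (pict_data_start : Int), Dom_get_limb_data pict_datas pict_data_start → Spec_get_limb_data pict_datas pict_data_start (get_limb_data pict_datas pict_data_start)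

-- ===== LEMMAS AND PROOFS =====
theorem pvLoopA_eq_alt (pict_datas : List (List Int)) (s : Int) :
    pvLoopA pict_datas s = get_limb_data_alt pict_datas s := by
  induction pict_datas generalizing s with
  | nil => simp [pvLoopA, get_limb_data_alt, pvAccum]
  | cons p rest ih =>
    by_cases h : p.length = 1 <;>
      simp [pvLoopA, get_limb_data_alt, pvAccum, h, ih]

-- ===== VERDICT =====
theorem get_limb_data_spec : Claim_equal_get_limb_data := by
  intro pict_datas pict_data_start _
  unfold Spec_get_limb_data get_limb_data
  exact pvLoopA_eq_alt pict_datas pict_data_start
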